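-- pv_equiv track=rewrite | github.com/ishandutta2007/codeforces | radewoosh/normal/468/C.py | f
-- ===== SOURCE A (Python) =====
-- def f(n, mod):
-- 	l=[]
-- 	while n>0:
-- 		l.append(n%10)
-- 		n//=10
-- 	ret=0
-- 	num=0
-- 	suma=0
-- 	war=1
-- 	for i in l:
-- 		a=0
-- 		b=0
--
-- 		for j in range(i):
-- 			a=(a+suma+j*war)%mod
-- 		a=(a+ret+i*(num+1))%mod
--
-- 		for j in range(10):
-- 			b=(b+suma+j*war)%mod
--
-- 		ret=a
-- 		suma=b
--
-- 		num=(num+war*i)%mod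
-- 		war=(war*10)%mod
-- 	return ret
-- ===== SOURCE B (Python) =====
-- def f(n, mod):
--     # Closed-form digit DP: the two inner loops of the original (arithmetic
--     # series computed by iteration) are replaced by exact formulas, and the
--     # digit list is never materialised -- one divmod loop does everything.
--     ret = num = suma = 0
--     war = 1
--     while n > 0:
--         n, d = divmod(n, 10)
--         ret = (d * suma + war * (d * (d - 1) // 2) + ret + d * (num + 1)) % mod
--         suma = (10 * suma + 45 * war) % mod
--         num = (num + war * d) % mod
--         war = (war * 10) % mod
--     return ret
-- ===== Notes on version B (the rewrite author's own statement) =====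
-- stated objective: simpler
-- what changed: Replaced A's two inner mod-accumulating loops (arithmetic series over range(i) and range(10)) with closed-form formulas d*suma + war*(d*(d-1)//2) and 10*suma + 45*war, and fused digit extraction with the DP loop so no digit list is ever built.
import Mathlib
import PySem

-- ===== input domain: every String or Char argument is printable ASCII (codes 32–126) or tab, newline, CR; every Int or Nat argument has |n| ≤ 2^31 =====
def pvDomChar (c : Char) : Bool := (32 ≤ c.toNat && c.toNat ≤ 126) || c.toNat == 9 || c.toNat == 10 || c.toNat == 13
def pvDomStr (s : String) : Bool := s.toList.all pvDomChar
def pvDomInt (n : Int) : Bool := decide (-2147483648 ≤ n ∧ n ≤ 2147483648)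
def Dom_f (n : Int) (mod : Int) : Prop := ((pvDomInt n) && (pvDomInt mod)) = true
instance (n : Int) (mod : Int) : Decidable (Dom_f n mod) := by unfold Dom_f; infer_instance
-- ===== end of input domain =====

-- B folds A's two constant-bounded inner loops into closed-form arithmetic-series
-- formulas and fuses digit extraction with the DP loop (no digit list); objective: simpler.

-- ===== PORT A =====

-- the `while n>0: l.append(n%10); n//=10` loop of A
def pyDigits (n : Int) : List Int :=
  if _h : n > 0 then PySem.Int.mod n 10 :: pyDigits (PySem.Int.floordiv n 10) else []
termination_by n.toNat
decreasing_by
  rw [PySem.Int.floordiv_eq_ediv_of_pos (by norm_num)]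
  omega

-- one iteration of A's `for i in l` loop; state = (ret, num, suma, war)
def stepA (m : Int) (st : Int × Int × Int × Int) (i : Int) : Int × Int × Int × Int :=
  let a := List.foldl (fun a j => PySem.Int.mod (a + st.2.2.1 + j * st.2.2.2) m) 0
             (PySem.List.pyRange 0 i 1)
  let a := PySem.Int.mod (a + st.1 + i * (st.2.1 + 1)) m
  let b := List.foldl (fun b j => PySem.Int.mod (b + st.2.2.1 + j * st.2.2.2) m) 0
             (PySem.List.pyRange 0 10 1)
  (a, PySem.Int.mod (st.2.1 + st.2.2.2 * i) m, b, PySem.Int.mod (st.2.2.2 * 10) m)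

def f (n : Int) (mod : Int) : Int :=
  ((pyDigits n).foldl (stepA mod) (0, 0, 0, 1)).1

-- ===== PORT B =====

-- Source B's single while-loop (divmod + closed-form updates)
def loopB (m ret num suma war n : Int) : Int :=
  if h : n > 0 then
    let d := PySem.Int.mod n 10
    loopB m
      (PySem.Int.mod (d * suma + war * (PySem.Int.floordiv (d * (d - 1)) 2) + ret + d * (num + 1)) m)
      (PySem.Int.mod (num + war * d) m)
      (PySem.Int.mod (10 * suma + 45 * war) m)
      (PySem.Int.mod (war * 10) m)
      (PySem.Int.floordiv n 10)
  else ret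
termination_by n.toNat
decreasing_by
  rw [PySem.Int.floordiv_eq_ediv_of_pos (by norm_num)]
  omega

def f_alt (n : Int) (mod : Int) : Int := loopB mod 0 0 0 1 n

-- ===== PRECONDITION & SPEC =====
-- Python raises ZeroDivisionError when mod = 0 and n has at least one digit (n > 0)
def Pre_f (n : Int) (mod : Int) : Prop := n ≤ 0 ∨ mod ≠ 0
instance (n : Int) (mod : Int) : Decidable (Pre_f n mod) := by unfold Pre_f; infer_instance
def pvWitness_f : Int × Int := (123456, 7)

def Spec_f (n : Int) (mod : Int) (out : Int) : Prop := out = f_alt n mod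
instance (n : Int) (mod : Int) (out : Int) : Decidable (Spec_f n mod out) := by unfold Spec_f; infer_instance

-- ===== CLAIM (what is proved, stated in full; the proofs are below) =====
def Claim_equal_f : Prop := ∀ (n : Int) (mod : Int), Dom_f n mod → Pre_f n mod → Spec_f n mod (f n mod)

-- ===== LEMMAS AND PROOFS =====

lemma pv_fmod_absorb (a b c m : Int) : (a.fmod m + b + c).fmod m = (a + b + c).fmod m := by
  rw [add_assoc, Int.fmod_add_fmod, ← add_assoc]

-- A's inner iterated-mod series loop has the closed form B uses
lemma pvInnerSum (m s w : Int) (k : Nat) :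
    List.foldl (fun a j => PySem.Int.mod (a + s + j * w) m) 0 (PySem.List.pyRange 0 (k : Int) 1) =
      PySem.Int.mod ((k : Int) * s + w * (PySem.Int.floordiv ((k : Int) * ((k : Int) - 1)) 2)) m := by
  induction k with
  | zero => simp [PySem.Int.mod, PySem.Int.floordiv]
  | succ k ih =>
    rw [PySem.List.pyRange_zero_natCast] at ih ⊢
    rw [List.range_succ, List.map_append, List.foldl_append, ih]
    simp only [List.map_cons, List.map_nil, List.foldl_cons, List.foldl_nil]
    unfold PySem.Int.mod PySem.Int.floordiv at *
    rw [pv_fmod_absorb]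
    have h1 : ((k : Int) + 1) * (((k : Int) + 1) - 1) = (k : Int) * ((k : Int) - 1) + (k : Int) * 2 := by ring
    have h2 : ((((k : Int) + 1)) * (((k : Int) + 1) - 1)).fdiv 2
        = ((k : Int) * ((k : Int) - 1)).fdiv 2 + (k : Int) := by
      rw [h1, Int.add_mul_fdiv_right _ _ (by norm_num)]
    push_cast
    rw [h2]
    ring_nf

lemma fmod_congr {a b : Int} (m : Int) (h : a = b) : a.fmod m = b.fmod m := by rw [h]

-- each step of A's fold computes exactly B's closed-form update
lemma step_eq (m r nu s w : Int) (d : Int) (hd : 0 ≤ d) :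
    stepA m (r, nu, s, w) d =
      (PySem.Int.mod (d * s + w * (PySem.Int.floordiv (d * (d - 1)) 2) + r + d * (nu + 1)) m,
       PySem.Int.mod (nu + w * d) m,
       PySem.Int.mod (10 * s + 45 * w) m,
       PySem.Int.mod (w * 10) m) := by
  unfold stepA
  have hk : d = ((d.toNat : Nat) : Int) := by omega
  simp only []
  have h10 := pvInnerSum m s w 10
  simp only [Nat.cast_ofNat] at h10
  have h45 : PySem.Int.floordiv ((10:Int) * ((10:Int) - 1)) 2 = 45 := by decide
  rw [h45] at h10
  rw [hk, pvInnerSum, h10]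
  unfold PySem.Int.mod PySem.Int.floordiv
  rw [pv_fmod_absorb]
  refine Prod.ext (fmod_congr m (by ring)) (Prod.ext rfl (Prod.ext ?_ rfl))
  exact fmod_congr m (by ring)

-- A's fold over the digit list equals B's fused loop, for any state
lemma loop_eq (m : Int) : ∀ (fuel : Nat) (n : Int), n.toNat ≤ fuel →
    ∀ (r nu s w : Int),
      ((pyDigits n).foldl (stepA m) (r, nu, s, w)).1 = loopB m r nu s w n := by
  intro fuel
  induction fuel with
  | zero =>
    intro n hn r nu s w
    have hle : n ≤ 0 := by omega
    rw [pyDigits, loopB]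
    simp [not_lt.mpr hle]
  | succ fuel ih =>
    intro n hn r nu s w
    rw [pyDigits, loopB]
    by_cases h : n > 0
    · simp only [h, dif_pos, List.foldl_cons]
      have hd : 0 ≤ PySem.Int.mod n 10 := PySem.Int.mod_nonneg _ (by norm_num)
      rw [step_eq m r nu s w _ hd]
      apply ih
      rw [PySem.Int.floordiv_eq_ediv_of_pos (by norm_num)]
      omega
    · simp [h]

-- ===== VERDICT (by name: the statement is the Claim_ definition above) =====
theorem f_spec : Claim_equal_f := by
  intro n m _ _
  unfold Spec_f f f_alt
  exact loop_eq m n.toNat n le_rfl 0 0 0 1
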